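-- pv_equiv track=rewrite | github.com/therthold/- | stack and queue/【模板】单调栈.py | humdrum
-- ===== SOURCE A (Python) =====
-- def humdrum(num):
--     stack = []
--     result = [0]*len(num)
--     for idx in range(len(num)):
--         while stack and stack[-1][1] < num[idx]:
--             i, _ = stack.pop()
--             result[i] = idx + 1
--         stack.append((idx, num[idx]))
--     return result
-- ===== SOURCE B (Python) =====
-- def humdrum(num):
--     n = len(num)
--
--     def nxt(i):
--         for j in range(i + 1, n):
--             if num[j] > num[i]:
--                 return j + 1
--         return 0
--
--     return [nxt(i) for i in range(n)]
-- ===== Notes on version B (the rewrite author's own statement) =====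
-- stated objective: simpler
-- what changed: Replaces the monotonic stack with a direct per-index forward scan: for each i, return 1-based index of the first strictly greater later element (0 if none), as a plain comprehension with no shared mutable state.
import Mathlib
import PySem

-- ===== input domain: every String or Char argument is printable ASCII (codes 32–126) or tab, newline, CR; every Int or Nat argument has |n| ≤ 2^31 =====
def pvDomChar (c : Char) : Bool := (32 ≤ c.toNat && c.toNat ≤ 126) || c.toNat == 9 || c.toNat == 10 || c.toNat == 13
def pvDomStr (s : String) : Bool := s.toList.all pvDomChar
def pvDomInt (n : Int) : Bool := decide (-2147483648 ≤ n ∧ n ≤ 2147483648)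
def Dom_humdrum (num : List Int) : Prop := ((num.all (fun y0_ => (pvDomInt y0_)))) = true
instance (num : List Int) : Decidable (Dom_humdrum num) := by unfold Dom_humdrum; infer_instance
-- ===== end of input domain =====

-- B replaces A's monotonic stack with a direct per-index forward scan for the first strictly greater later element: simpler, no shared mutable state (O(n^2) vs A's O(n)).


-- ===== PORT A =====
-- the inner `while stack and stack[-1][1] < num[idx]` loop (stack top = list head)
def popWhileA (v : Int) (idx : Nat) : List (Nat × Int) → List Int → List (Nat × Int) × List Int
  | [], res => ([], res)
  | (i, w) :: st, res =>
    if w < v then popWhileA v idx st (res.set i ((idx : Int) + 1))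
    else ((i, w) :: st, res)

def humdrum (num : List Int) : List Int :=
  ((List.range num.length).foldl
    (fun (s : List (Nat × Int) × List Int) (idx : Nat) =>
      let v := num.getD idx 0
      let t := popWhileA v idx s.1 s.2
      ((idx, v) :: t.1, t.2))
    (([] : List (Nat × Int)), List.replicate num.length 0)).2

-- ===== PORT B =====
-- the inner `for j in range(i+1, n): if num[j] > num[i]: return j+1` scan
def nxtB (num : List Int) (i : Nat) : Int :=
  match (List.range' (i + 1) (num.length - (i + 1))).find?
      (fun j => decide (num.getD i 0 < num.getD j 0)) with
  | some j => (j : Int) + 1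
  | none => 0

def humdrum_alt (num : List Int) : List Int :=
  (List.range num.length).map (fun i => nxtB num i)

-- ===== PRECONDITION & SPEC =====
def Spec_humdrum (num : List Int) (out : List Int) : Prop := out = humdrum_alt num
instance (num : List Int) (out : List Int) : Decidable (Spec_humdrum num out) := by unfold Spec_humdrum; infer_instance

-- ===== CLAIM (what is proved, stated in full; the proofs are below) =====
def Claim_equal_humdrum : Prop := ∀ (num : List Int), Dom_humdrum num → Spec_humdrum num (humdrum num)

-- ===== LEMMAS AND PROOFS =====

def gI (num : List Int) (i : Nat) : Int := num.getD i 0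

-- i (assumed < k) is still on the stack after processing the prefix of length k
def keepB (num : List Int) (k i : Nat) : Bool :=
  (List.range' (i + 1) (k - (i + 1))).all (fun j => decide (gI num j ≤ gI num i))

def stkI (num : List Int) (k : Nat) : List (Nat × Int) :=
  (((List.range k).filter (fun i => keepB num k i)).map (fun i => (i, gI num i))).reverse

def resI (num : List Int) (k : Nat) : List Int :=
  (List.range num.length).map
    (fun i => if i < k ∧ keepB num k i = false then nxtB num i else (0 : Int))

theorem popWhileA_eq (v : Int) (idx : Nat) :
    ∀ (st : List (Nat × Int)) (res : List Int),
      popWhileA v idx st res =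
        (st.dropWhile (fun p => decide (p.2 < v)),
         (st.takeWhile (fun p => decide (p.2 < v))).foldl
           (fun r p => r.set p.1 ((idx : Int) + 1)) res) := by
  intro st
  induction st with
  | nil => intro res; simp [popWhileA]
  | cons p st ih =>
    intro res
    obtain ⟨i, w⟩ := p
    by_cases h : w < v
    · simp [popWhileA, List.dropWhile, List.takeWhile, h, ih]
    · simp [popWhileA, List.dropWhile, List.takeWhile, h]

theorem dropWhile_eq_filter_of_pw {α : Type} (p : α → Bool) :
    ∀ l : List α, List.Pairwise (fun a b => p a = false → p b = false) l →
      l.dropWhile p = l.filter (fun x => !p x) := by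
  intro l
  induction l with
  | nil => simp
  | cons a l ih =>
    intro hpw
    rcases List.pairwise_cons.mp hpw with ⟨ha, htl⟩
    by_cases h : p a = true
    · simp [List.dropWhile, List.filter, h, ih htl]
    · simp only [Bool.not_eq_true] at h
      have : l.filter (fun x => !p x) = l :=
        List.filter_eq_self.mpr (fun b hb => by simp [ha b hb h])
      simp [List.dropWhile, List.filter, h, this]

theorem takeWhile_eq_filter_of_pw {α : Type} (p : α → Bool) :
    ∀ l : List α, List.Pairwise (fun a b => p a = false → p b = false) l →
      l.takeWhile p = l.filter p := by
  intro l
  induction l with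
  | nil => simp
  | cons a l ih =>
    intro hpw
    rcases List.pairwise_cons.mp hpw with ⟨ha, htl⟩
    by_cases h : p a = true
    · simp [List.takeWhile, List.filter, h, ih htl]
    · simp only [Bool.not_eq_true] at h
      have : l.filter p = [] :=
        List.filter_eq_nil_iff.mpr (fun b hb => by simp [ha b hb h])
      simp [List.takeWhile, List.filter, h, this]

theorem keepB_le (num : List Int) (k i j : Nat) (hk : keepB num k i = true)
    (hij : i < j) (hjk : j < k) : gI num j ≤ gI num i := by
  have hj : j ∈ List.range' (i + 1) (k - (i + 1)) := by
    rw [List.mem_range'_1]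
    omega
  simpa using List.all_eq_true.mp hk j hj

theorem stk_pairwise (num : List Int) (k : Nat) :
    List.Pairwise (fun a b : Nat × Int => a.2 ≤ b.2) (stkI num k) := by
  unfold stkI
  rw [List.pairwise_reverse, List.pairwise_map]
  have h0 : List.Pairwise (· < ·) ((List.range k).filter (fun i => keepB num k i)) :=
    (List.pairwise_lt_range (n := k)).filter _
  refine h0.imp_of_mem ?_
  intro a b ha hb hab
  rcases List.mem_filter.mp ha with ⟨ha', hka⟩
  rcases List.mem_filter.mp hb with ⟨hb', hkb⟩
  exact keepB_le num k a b hka hab (List.mem_range.mp (by simpa using hb'))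

theorem keepB_succ (num : List Int) (k i : Nat) (h : i < k) :
    keepB num (k + 1) i = (keepB num k i && decide (gI num k ≤ gI num i)) := by
  unfold keepB
  have h1 : (k + 1) - (i + 1) = (k - (i + 1)) + 1 := by omega
  have h2 : (i + 1) + (k - (i + 1)) = k := by omega
  rw [h1, List.range'_concat, List.all_append]
  simp only [one_mul, h2]
  simp

theorem keepB_self (num : List Int) (k : Nat) : keepB num (k + 1) k = true := by
  unfold keepB
  simp

theorem foldl_set_length (c : Int) :
    ∀ (P : List (Nat × Int)) (l : List Int),
      (P.foldl (fun r p => r.set p.1 c) l).length = l.length := by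
  intro P
  induction P with
  | nil => simp
  | cons p P ih => intro l; rw [List.foldl_cons, ih]; simp

theorem foldl_set_getD (c : Int) :
    ∀ (P : List (Nat × Int)) (l : List Int) (j : Nat),
      (∀ p ∈ P, p.1 < l.length) →
      (P.foldl (fun r p => r.set p.1 c) l).getD j 0 =
        if P.any (fun p => decide (p.1 = j)) then c else l.getD j 0 := by
  intro P
  induction P with
  | nil => simp
  | cons p P ih =>
    intro l j hlt
    have hlen : ∀ q ∈ P, q.1 < (l.set p.1 c).length := by
      intro q hq; simpa using hlt q (List.mem_cons_of_mem _ hq)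
    rw [List.foldl_cons, ih (l.set p.1 c) j hlen]
    by_cases hP : P.any (fun q => decide (q.1 = j)) = true
    · simp [hP]
    · by_cases hpj : p.1 = j
      · have hj : j < l.length := hpj ▸ hlt p (List.mem_cons_self)
        simp [hP, hpj, List.getD_eq_getElem?_getD, hj]
      · simp [hP, hpj, List.getD_eq_getElem?_getD, List.getElem?_set_ne (by simpa using hpj)]

-- if all of (i, k) is ≤ num[i] and num[k] > num[i], then k is the first strictly greater index
theorem nxtB_first (num : List Int) (k j : Nat) (hjk : j < k) (hk : k < num.length)
    (hkeep : keepB num k j = true) (hlt : gI num j < gI num k) :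
    nxtB num j = (k : Int) + 1 := by
  unfold nxtB
  have hsplit : num.length - (j + 1) = (k - (j + 1)) + (num.length - k) := by omega
  have hadd : (j + 1) + (k - (j + 1)) = k := by omega
  rw [hsplit, ← List.range'_append]
  rw [show j + 1 + 1 * (k - (j + 1)) = k by omega]
  have hnone :
      (List.range' (j + 1) (k - (j + 1))).find?
        (fun j' => decide (num.getD j 0 < num.getD j' 0)) = none := by
    apply List.find?_eq_none.mpr
    intro x hx
    rw [List.mem_range'] at hx
    have := keepB_le num k j x hkeep (by omega) (by omega)
    simpa [gI] using this
  have hnk : num.length - k = (num.length - k - 1) + 1 := by omega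
  rw [List.find?_append, hnone, Option.none_or, hnk, List.range'_succ,
    List.find?_cons_of_pos (by simpa [gI, List.getD_eq_getElem?_getD] using hlt)]

theorem nxtB_none (num : List Int) (j : Nat) (hkeep : keepB num num.length j = true) :
    nxtB num j = 0 := by
  unfold nxtB
  have hnone :
      (List.range' (j + 1) (num.length - (j + 1))).find?
        (fun j' => decide (num.getD j 0 < num.getD j' 0)) = none := by
    apply List.find?_eq_none.mpr
    intro x hx
    rw [List.mem_range'] at hx
    have := keepB_le num num.length j x hkeep (by omega) (by omega)
    simpa [gI] using this
  rw [hnone]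

theorem resI_length (num : List Int) (k : Nat) : (resI num k).length = num.length := by
  simp [resI]

theorem main_inv (num : List Int) :
    ∀ k, k ≤ num.length →
      (List.range k).foldl
        (fun (s : List (Nat × Int) × List Int) (idx : Nat) =>
          let v := num.getD idx 0
          let t := popWhileA v idx s.1 s.2
          ((idx, v) :: t.1, t.2))
        (([] : List (Nat × Int)), List.replicate num.length 0) =
      (stkI num k, resI num k) := by
  intro k
  induction k with
  | zero =>
    intro _
    simp [stkI, resI]
  | succ k ih =>
    intro hk
    have hk' : k ≤ num.length := by omega
    rw [List.range_succ, List.foldl_append, ih hk', List.foldl_cons, List.foldl_nil]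
    show ((k, num.getD k 0) :: (popWhileA (num.getD k 0) k (stkI num k) (resI num k)).1,
        (popWhileA (num.getD k 0) k (stkI num k) (resI num k)).2) =
      (stkI num (k + 1), resI num (k + 1))
    rw [popWhileA_eq, Prod.mk.injEq]
    have hpw : List.Pairwise
        (fun a b : Nat × Int => (decide (a.2 < num.getD k 0) = false) →
          (decide (b.2 < num.getD k 0) = false)) (stkI num k) := by
      refine (stk_pairwise num k).imp ?_
      intro a b hab ha
      simp only [decide_eq_false_iff_not, not_lt] at *
      exact le_trans ha hab
    -- the popped prefix and the surviving stack, as filters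
    have hdrop := dropWhile_eq_filter_of_pw _ (stkI num k) hpw
    have htake := takeWhile_eq_filter_of_pw _ (stkI num k) hpw
    constructor
    · -- stack component
      rw [hdrop]
      have hrhs : stkI num (k + 1) =
          (k, gI num k) ::
            (((List.range k).filter (fun i => keepB num (k + 1) i)).map
              (fun i => (i, gI num i))).reverse := by
        unfold stkI
        rw [List.range_succ, List.filter_append,
          show [k].filter (fun i => keepB num (k + 1) i) = [k] by simp [keepB_self],
          List.map_append, List.reverse_append]
        rfl
      rw [hrhs]
      have htail :
          (stkI num k).filter (fun p => !decide (p.2 < num.getD k 0)) =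
            (((List.range k).filter (fun i => keepB num (k + 1) i)).map
              (fun i => (i, gI num i))).reverse := by
        unfold stkI
        rw [List.filter_reverse, List.filter_map, List.filter_filter]
        congr 1
        apply congrArg
        apply List.filter_congr
        intro i hi
        rw [keepB_succ num k i (List.mem_range.mp hi)]
        simp [gI, ← decide_not, not_lt, Bool.and_comm]
      rw [htail]
      rfl
    · -- result component
      rw [htake]
      have hbound : ∀ p ∈ (stkI num k).filter (fun p => decide (p.2 < num.getD k 0)),
          p.1 < (resI num k).length := by
        intro p hp
        rcases List.mem_filter.mp hp with ⟨hp', _⟩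
        unfold stkI at hp'
        rw [List.mem_reverse, List.mem_map] at hp'
        rcases hp' with ⟨i, hi, rfl⟩
        rcases List.mem_filter.mp hi with ⟨hi', _⟩
        rw [resI_length]
        exact lt_of_lt_of_le (List.mem_range.mp hi') hk'
      apply List.ext_getElem
      · rw [foldl_set_length, resI_length, resI_length]
      · intro j hj₁ hj₂
        rw [← List.getD_eq_getElem _ 0, ← List.getD_eq_getElem _ 0,
          foldl_set_getD _ _ _ _ hbound]
        have hjn : j < num.length := by
          rw [resI_length] at hj₂; exact hj₂
        have hres : ∀ m, (resI num m).getD j 0 =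
            if j < m ∧ keepB num m j = false then nxtB num j else 0 := by
          intro m
          rw [resI, List.getD_eq_getElem _ 0 (by simpa using hjn)]
          simp
        have hany : ((stkI num k).filter (fun p => decide (p.2 < num.getD k 0))).any
              (fun p => decide (p.1 = j)) = true ↔
            (j < k ∧ keepB num k j = true ∧ gI num j < num.getD k 0) := by
          simp only [List.any_eq_true, List.mem_filter, stkI, List.mem_reverse,
            List.mem_map, List.mem_range, decide_eq_true_eq]
          constructor
          · rintro ⟨p, ⟨⟨i, ⟨hik, hkeep⟩, rfl⟩, hlt⟩, hj⟩
            simp only at hj hlt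
            subst hj
            exact ⟨hik, hkeep, hlt⟩
          · rintro ⟨hjk, hkeep, hlt⟩
            exact ⟨(j, gI num j), ⟨⟨j, ⟨hjk, hkeep⟩, rfl⟩, hlt⟩, rfl⟩
        rw [hres, hres]
        by_cases hc : j < k ∧ keepB num k j = true ∧ gI num j < num.getD k 0
        · rw [if_pos (hany.mpr hc)]
          rcases hc with ⟨hjk, hkeep, hlt⟩
          have hkn : k < num.length := by omega
          have hk1 : keepB num (k + 1) j = false := by
            rw [keepB_succ num k j hjk, hkeep]
            simp [gI] at hlt ⊢
            omega
          rw [if_pos ⟨by omega, hk1⟩]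
          exact (nxtB_first num k j hjk hkn hkeep (by simpa [gI] using hlt)).symm
        · rw [if_neg (fun h => hc (hany.mp h))]
          by_cases hjk : j < k
          · by_cases hkeep : keepB num k j = true
            · have hge : ¬ gI num j < num.getD k 0 := fun h => hc ⟨hjk, hkeep, h⟩
              have hk1 : keepB num (k + 1) j = true := by
                rw [keepB_succ num k j hjk, hkeep]
                simp [gI] at hge ⊢
                omega
              rw [if_neg (by simp [hkeep]), if_neg (by simp [hk1])]
            · have hkeep' : keepB num k j = false := by simpa using hkeep
              have hk1 : keepB num (k + 1) j = false := by
                rw [keepB_succ num k j hjk, hkeep']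
                simp
              rw [if_pos ⟨hjk, hkeep'⟩, if_pos ⟨by omega, hk1⟩]
          · by_cases hje : j = k
            · subst hje
              rw [if_neg (by simp), if_neg (by simp [keepB_self])]
            · rw [if_neg (by rintro ⟨h, _⟩; omega), if_neg (by rintro ⟨h, _⟩; omega)]

theorem humdrum_eq_resI (num : List Int) : humdrum num = resI num num.length := by
  unfold humdrum
  rw [main_inv num num.length le_rfl]

-- ===== VERDICT (by name: the statement is the Claim_ definition above) =====
theorem humdrum_spec : Claim_equal_humdrum := by
  intro num _
  unfold Spec_humdrum
  rw [humdrum_eq_resI]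
  unfold humdrum_alt resI
  apply List.map_congr_left
  intro i hi
  have hin : i < num.length := List.mem_range.mp hi
  by_cases hkeep : keepB num num.length i = true
  · simp [hkeep, nxtB_none num i hkeep]
  · simp only [Bool.not_eq_true] at hkeep
    simp [hin, hkeep]
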